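-- pv_equiv track=rewrite | github.com/beginnerimran/Chatbot_RAG | ui_components.py | _password_rules_html
-- ===== SOURCE A (Python) =====
-- def _password_rules_html(password: str) -> str:
--     """Return an HTML checklist of password rules with pass/fail status."""
--     rules = [
--         ("At least 8 characters",              len(password) >= 8),
--         ("One uppercase letter (A-Z)",          any(c.isupper() for c in password)),
--         ("One lowercase letter (a-z)",          any(c.islower() for c in password)),
--         ("One number (0-9)",                    any(c.isdigit() for c in password)),
--         ("One special character (!@#$%^&* …)",  any(c in "!@#$%^&*()_+-=[]{}|;':\",./<>?" for c in password)),
--     ]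
--     items = ""
--     for label, passed in rules:
--         color = "#0a7c4e" if passed else "#c0392b"
--         icon  = "✓" if passed else "✗"
--         items += (
--             f'<div style="display:flex;align-items:center;gap:6px;margin-bottom:3px;">'
--             f'<span style="font-size:0.75rem;font-weight:700;color:{color};width:14px;">{icon}</span>'
--             f'<span style="font-size:0.75rem;color:var(--text-2);">{label}</span>'
--             f'</div>'
--         )
--     return f'<div style="padding:8px 12px;background:var(--bg-3);border-radius:6px;margin-top:4px;">{items}</div>'
-- ===== SOURCE B (Python) =====
-- def _password_rules_html(password: str) -> str:
--     """Return an HTML checklist of password rules with pass/fail status."""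
--     has_upper = has_lower = has_digit = has_special = False
--     for c in password:
--         if c.isupper():
--             has_upper = True
--         if c.islower():
--             has_lower = True
--         if c.isdigit():
--             has_digit = True
--         if c in "!@#$%^&*()_+-=[]{}|;':\",./<>?":
--             has_special = True
--     rules = [
--         ("At least 8 characters",              len(password) >= 8),
--         ("One uppercase letter (A-Z)",          has_upper),
--         ("One lowercase letter (a-z)",          has_lower),
--         ("One number (0-9)",                    has_digit),
--         ("One special character (!@#$%^&* …)",  has_special),
--     ]
--     items = "".join(_rule_row(label, passed) for label, passed in rules)
--     return f'<div style="padding:8px 12px;background:var(--bg-3);border-radius:6px;margin-top:4px;">{items}</div>'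
--
--
-- def _rule_row(label: str, passed: bool) -> str:
--     color = "#0a7c4e" if passed else "#c0392b"
--     icon = "✓" if passed else "✗"
--     return (
--         f'<div style="display:flex;align-items:center;gap:6px;margin-bottom:3px;">'
--         f'<span style="font-size:0.75rem;font-weight:700;color:{color};width:14px;">{icon}</span>'
--         f'<span style="font-size:0.75rem;color:var(--text-2);">{label}</span>'
--         f'</div>'
--     )
-- ===== Notes on version B (the rewrite author's own statement) =====
-- stated objective: alternative
-- what changed: B replaces A's five independent any()-scans of the password with a single pass that updates four boolean flags per character, and replaces A's string-accumulating loop with ''.join over a per-rule formatting helper.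
import Mathlib
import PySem

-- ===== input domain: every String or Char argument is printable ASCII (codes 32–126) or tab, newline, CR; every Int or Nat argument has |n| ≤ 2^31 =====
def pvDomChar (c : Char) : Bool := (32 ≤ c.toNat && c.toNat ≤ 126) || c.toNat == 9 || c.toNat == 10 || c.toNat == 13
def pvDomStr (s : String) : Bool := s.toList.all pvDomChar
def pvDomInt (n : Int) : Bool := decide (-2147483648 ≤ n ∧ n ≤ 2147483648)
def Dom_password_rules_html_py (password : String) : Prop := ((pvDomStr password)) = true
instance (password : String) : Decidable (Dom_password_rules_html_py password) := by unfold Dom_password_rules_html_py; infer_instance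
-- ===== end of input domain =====

-- B replaces A's five separate any()-scans of the password by one single pass computing all
-- four character flags, and replaces the string-accumulating loop by "".join over a helper
-- (objective: alternative decomposition, same cost).

-- ===== PORT A =====
-- the special-character set of A, as a list of characters ('c in s' for a 1-char c is exact char membership)
def pvSpecials : List Char := "!@#$%^&*()_+-=[]{}|;':\",./<>?".toList

-- literal transliteration of A: the rules list with its five independent scans,
-- then a loop appending one <div> row per rule to `items`.
def password_rules_html_py (password : String) : String :=
  let rules : List (String × Bool) :=
    [ ("At least 8 characters", decide (8 ≤ PySem.Str.len password)),
      ("One uppercase letter (A-Z)", password.toList.any PySem.Chars.isupper),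
      ("One lowercase letter (a-z)", password.toList.any PySem.Chars.islower),
      ("One number (0-9)", password.toList.any PySem.Chars.isdigit),
      ("One special character (!@#$%^&* …)", password.toList.any (fun c => pvSpecials.contains c)) ]
  let items : String :=
    rules.foldl
      (fun items r =>
        let color := if r.2 then "#0a7c4e" else "#c0392b"
        let icon := if r.2 then "✓" else "✗"
        items ++
          ("<div style=\"display:flex;align-items:center;gap:6px;margin-bottom:3px;\">" ++
           "<span style=\"font-size:0.75rem;font-weight:700;color:" ++ color ++ ";width:14px;\">" ++ icon ++ "</span>" ++
           "<span style=\"font-size:0.75rem;color:var(--text-2);\">" ++ r.1 ++ "</span>" ++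
           "</div>"))
      ""
  "<div style=\"padding:8px 12px;background:var(--bg-3);border-radius:6px;margin-top:4px;\">" ++ items ++ "</div>"

-- ===== PORT B =====
-- helper _rule_row of B
def pvRuleRow (label : String) (passed : Bool) : String :=
  let color := if passed then "#0a7c4e" else "#c0392b"
  let icon := if passed then "✓" else "✗"
  "<div style=\"display:flex;align-items:center;gap:6px;margin-bottom:3px;\">" ++
  "<span style=\"font-size:0.75rem;font-weight:700;color:" ++ color ++ ";width:14px;\">" ++ icon ++ "</span>" ++
  "<span style=\"font-size:0.75rem;color:var(--text-2);\">" ++ label ++ "</span>" ++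
  "</div>"

-- literal transliteration of B: one fold over the characters computing the four flags,
-- then "".join of the formatted rows.
def password_rules_html_py_alt (password : String) : String :=
  let flags : Bool × Bool × Bool × Bool :=
    password.toList.foldl
      (fun fl c =>
        let fl := if PySem.Chars.isupper c then (true, fl.2.1, fl.2.2.1, fl.2.2.2) else fl
        let fl := if PySem.Chars.islower c then (fl.1, true, fl.2.2.1, fl.2.2.2) else fl
        let fl := if PySem.Chars.isdigit c then (fl.1, fl.2.1, true, fl.2.2.2) else fl
        if pvSpecials.contains c then (fl.1, fl.2.1, fl.2.2.1, true) else fl)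
      (false, false, false, false)
  let rules : List (String × Bool) :=
    [ ("At least 8 characters", decide (8 ≤ PySem.Str.len password)),
      ("One uppercase letter (A-Z)", flags.1),
      ("One lowercase letter (a-z)", flags.2.1),
      ("One number (0-9)", flags.2.2.1),
      ("One special character (!@#$%^&* …)", flags.2.2.2) ]
  let items : String := String.join (rules.map (fun r => pvRuleRow r.1 r.2))
  "<div style=\"padding:8px 12px;background:var(--bg-3);border-radius:6px;margin-top:4px;\">" ++ items ++ "</div>"

-- ===== PRECONDITION & SPEC =====
def Spec_password_rules_html_py (password : String) (out : String) : Prop := out = password_rules_html_py_alt password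
instance (password : String) (out : String) : Decidable (Spec_password_rules_html_py password out) := by unfold Spec_password_rules_html_py; infer_instance

-- ===== CLAIM (what is proved, stated in full; the proofs are below) =====
def Claim_equal_password_rules_html_py : Prop := ∀ (password : String), Dom_password_rules_html_py password → Spec_password_rules_html_py password (password_rules_html_py password)

-- ===== LEMMAS AND PROOFS =====

-- B's one-pass flag fold computes exactly A's four any-scans.
theorem pvFlags_eq (l : List Char) (a b c d : Bool) :
    l.foldl
      (fun fl ch =>
        let fl := if PySem.Chars.isupper ch then (true, fl.2.1, fl.2.2.1, fl.2.2.2) else fl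
        let fl := if PySem.Chars.islower ch then (fl.1, true, fl.2.2.1, fl.2.2.2) else fl
        let fl := if PySem.Chars.isdigit ch then (fl.1, fl.2.1, true, fl.2.2.2) else fl
        if pvSpecials.contains ch then (fl.1, fl.2.1, fl.2.2.1, true) else fl)
      (a, b, c, d)
    = (a || l.any PySem.Chars.isupper, b || l.any PySem.Chars.islower,
       c || l.any PySem.Chars.isdigit, d || l.any (fun ch => pvSpecials.contains ch)) := by
  induction l generalizing a b c d with
  | nil => simp
  | cons x xs ih =>
    simp only [List.foldl_cons, List.any_cons]
    rw [ih]
    by_cases hu : PySem.Chars.isupper x <;>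
      by_cases hl : PySem.Chars.islower x <;>
        by_cases hd : PySem.Chars.isdigit x <;>
          by_cases hs : x ∈ pvSpecials <;>
            simp [hu, hl, hd, hs]

-- ===== VERDICT (by name: the statement is the Claim_ definition above) =====
theorem password_rules_html_py_spec : Claim_equal_password_rules_html_py := by
  intro password _
  show _ = _
  unfold password_rules_html_py password_rules_html_py_alt
  rw [pvFlags_eq]
  simp only [Bool.false_or]
  unfold String.join
  rw [List.foldl_map]
  rfl
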